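-- pv_equiv track=rewrite | github.com/cd80/autoprolab | agents/initial_access_agent.py | _categorize_service_type
-- ===== SOURCE A (Python) =====
-- def _categorize_service_type(service_name: str) -> str:
--     """Categorize service type for exploitation."""
--     service_lower = service_name.lower()
--
--     if any(web in service_lower for web in ['http', 'https', 'web']):
--         return 'web'
--     elif any(smb in service_lower for smb in ['smb', 'netbios', 'microsoft-ds']):
--         return 'smb'
--     elif 'ssh' in service_lower:
--         return 'ssh'
--     elif 'ftp' in service_lower:
--         return 'ftp'
--     elif any(mail in service_lower for mail in ['smtp', 'pop3', 'imap']):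
--         return 'mail'
--     else:
--         return 'general'
-- ===== SOURCE B (Python) =====
-- _KEYWORD_PRIORITY = {
--     'http': 0, 'https': 0, 'web': 0,
--     'smb': 1, 'netbios': 1, 'microsoft-ds': 1,
--     'ssh': 2,
--     'ftp': 3,
--     'smtp': 4, 'pop3': 4, 'imap': 4,
-- }
-- _CATEGORIES = ['web', 'smb', 'ssh', 'ftp', 'mail']
--
-- def _categorize_service_type(service_name: str) -> str:
--     """Categorize service type for exploitation."""
--     service_lower = service_name.lower()
--     hits = [p for k, p in _KEYWORD_PRIORITY.items() if k in service_lower]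
--     return _CATEGORIES[min(hits)] if hits else 'general'
-- ===== Notes on version B (the rewrite author's own statement) =====
-- stated objective: alternative
-- what changed: Instead of a short-circuiting if/elif cascade, B exhaustively collects the priorities of ALL matching keywords from a flat keyword-to-priority map and returns the category at the minimum priority (argmin selection), 'general' when no keyword matches.
import Mathlib
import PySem

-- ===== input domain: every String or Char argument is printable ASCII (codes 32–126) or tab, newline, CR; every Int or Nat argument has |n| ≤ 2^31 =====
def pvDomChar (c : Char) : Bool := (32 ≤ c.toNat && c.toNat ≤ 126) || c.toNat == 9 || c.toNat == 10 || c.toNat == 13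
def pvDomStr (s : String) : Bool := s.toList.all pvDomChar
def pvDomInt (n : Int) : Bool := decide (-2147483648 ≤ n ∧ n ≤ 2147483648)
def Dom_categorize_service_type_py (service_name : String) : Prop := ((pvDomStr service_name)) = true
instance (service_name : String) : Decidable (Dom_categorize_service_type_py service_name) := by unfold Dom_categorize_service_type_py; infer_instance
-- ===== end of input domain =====

-- B collects the priorities of ALL matching keywords from a flat keyword->priority table and returns the category of the minimum priority (argmin), instead of A's short-circuiting if/elif cascade (objective: alternative).


-- ===== PORT A =====
def categorize_service_type_py (service_name : String) : String :=
  let service_lower := PySem.Str.lower service_name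
  if ["http", "https", "web"].any (fun web => PySem.Str.isIn web service_lower) then
    "web"
  else if ["smb", "netbios", "microsoft-ds"].any (fun smb => PySem.Str.isIn smb service_lower) then
    "smb"
  else if PySem.Str.isIn "ssh" service_lower then
    "ssh"
  else if PySem.Str.isIn "ftp" service_lower then
    "ftp"
  else if ["smtp", "pop3", "imap"].any (fun mail => PySem.Str.isIn mail service_lower) then
    "mail"
  else
    "general"

-- ===== PORT B =====
-- the module-level dict _KEYWORD_PRIORITY, in insertion order
def pvKeywordPriority : List (String × Nat) :=
  [("http", 0), ("https", 0), ("web", 0),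
   ("smb", 1), ("netbios", 1), ("microsoft-ds", 1),
   ("ssh", 2),
   ("ftp", 3),
   ("smtp", 4), ("pop3", 4), ("imap", 4)]

def pvCategories : List String := ["web", "smb", "ssh", "ftp", "mail"]

def categorize_service_type_py_alt (service_name : String) : String :=
  let service_lower := PySem.Str.lower service_name
  let hits := (pvKeywordPriority.filter (fun kp => PySem.Str.isIn kp.1 service_lower)).map Prod.snd
  match PySem.List.min? hits (fun x => x) with
  | some p => pvCategories.getD p "general"   -- index always in [0,4], so plain getD is exact for Python's _CATEGORIES[p]
  | none => "general"

-- ===== PRECONDITION & SPEC =====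
def Spec_categorize_service_type_py (service_name : String) (out : String) : Prop := out = categorize_service_type_py_alt service_name
instance (service_name : String) (out : String) : Decidable (Spec_categorize_service_type_py service_name out) := by unfold Spec_categorize_service_type_py; infer_instance

-- ===== CLAIM (what is proved, stated in full; the proofs are below) =====
def Claim_equal_categorize_service_type_py : Prop := ∀ (service_name : String), Dom_categorize_service_type_py service_name → Spec_categorize_service_type_py service_name (categorize_service_type_py service_name)

-- ===== LEMMAS AND PROOFS =====

-- ===== VERDICT (by name: the statement is the Claim_ definition above) =====
set_option maxHeartbeats 1600000 in
theorem categorize_service_type_py_spec : Claim_equal_categorize_service_type_py := by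
  intro s _
  unfold Spec_categorize_service_type_py categorize_service_type_py categorize_service_type_py_alt pvKeywordPriority pvCategories
  dsimp only
  simp only [List.any_cons, List.any_nil, List.filter_cons, List.filter_nil, Bool.or_false]
  generalize PySem.Str.isIn "https" (PySem.Str.lower s) = b2
  generalize PySem.Str.isIn "http" (PySem.Str.lower s) = b1
  generalize PySem.Str.isIn "web" (PySem.Str.lower s) = b3
  generalize PySem.Str.isIn "smb" (PySem.Str.lower s) = b4
  generalize PySem.Str.isIn "netbios" (PySem.Str.lower s) = b5
  generalize PySem.Str.isIn "microsoft-ds" (PySem.Str.lower s) = b6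
  generalize PySem.Str.isIn "ssh" (PySem.Str.lower s) = b7
  generalize PySem.Str.isIn "ftp" (PySem.Str.lower s) = b8
  generalize PySem.Str.isIn "smtp" (PySem.Str.lower s) = b9
  generalize PySem.Str.isIn "pop3" (PySem.Str.lower s) = b10
  generalize PySem.Str.isIn "imap" (PySem.Str.lower s) = b11
  revert b1 b2 b3 b4 b5 b6 b7 b8 b9 b10 b11
  decide
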